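-- pv_equiv track=rewrite | github.com/usefolio/folio | backend/scripts/deploy_cloudbuild_trigger.py | contains_placeholders
-- ===== SOURCE A (Python) =====
-- def contains_placeholders(values: dict[str, str]) -> list[str]:
--     placeholder_fragments = (
--         "replace_me",
--         "replace-me",
--         "replace-with-trigger-id",
--         "your-app.run.app",
--     )
--     bad: list[str] = []
--     for key, value in values.items():
--         if key == "_TRIGGER_ID":
--             continue
--         if any(fragment in value for fragment in placeholder_fragments):
--             bad.append(key)
--     return bad
-- ===== SOURCE B (Python) =====
-- def contains_placeholders(values: dict[str, str]) -> list[str]: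
--     fragments = (
--         "replace_me",
--         "replace-me",
--         "replace-with-trigger-id",
--         "your-app.run.app",
--     )
--
--     def _has_placeholder(v: str) -> bool:
--         # single left-to-right scan; fragments all start with 'r' or 'y'
--         for i, c in enumerate(v):
--             if (c == 'r' or c == 'y') and any(v.startswith(f, i) for f in fragments):
--                 return True
--         return False
--
--     return [k for k, v in values.items()
--             if k != "_TRIGGER_ID" and _has_placeholder(v)]
-- ===== Notes on version B (the rewrite author's own statement) =====
-- stated objective: alternative
-- what changed: Replaced the four independent 'fragment in value' substring scans per value by a single left-to-right scan of each value that checks, at each position whose character is 'r' or 'y', whether any fragment starts there, and built the result as a comprehension instead of an accumulator loop.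
import Mathlib
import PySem

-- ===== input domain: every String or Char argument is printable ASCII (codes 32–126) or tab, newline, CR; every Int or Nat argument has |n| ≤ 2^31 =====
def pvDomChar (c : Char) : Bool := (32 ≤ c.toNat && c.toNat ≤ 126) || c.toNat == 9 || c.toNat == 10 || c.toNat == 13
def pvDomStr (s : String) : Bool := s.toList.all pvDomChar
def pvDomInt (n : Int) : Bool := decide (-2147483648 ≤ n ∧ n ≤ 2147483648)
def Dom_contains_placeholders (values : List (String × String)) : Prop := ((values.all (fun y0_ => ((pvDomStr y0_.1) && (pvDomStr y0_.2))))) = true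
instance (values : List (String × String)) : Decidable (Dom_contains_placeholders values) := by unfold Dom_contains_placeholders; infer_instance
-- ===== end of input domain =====

-- B replaces the four per-value 'fragment in value' substring scans by one left-to-right scan
-- of each value (first-char filter 'r'/'y', then prefix checks); objective: alternative algorithm.


-- ===== PORT A =====
def pvFragmentsA : List String :=
  ["replace_me", "replace-me", "replace-with-trigger-id", "your-app.run.app"]

def contains_placeholders (values : List (String × String)) : List String :=
  values.foldl (fun bad kv =>
    if kv.1 == "_TRIGGER_ID" then bad
    else if pvFragmentsA.any (fun f => PySem.Str.isIn f kv.2) then bad ++ [kv.1]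
    else bad) []

-- ===== PORT B =====
def pvFragmentsB : List (List Char) :=
  ["replace_me".toList, "replace-me".toList, "replace-with-trigger-id".toList,
   "your-app.run.app".toList]

-- one scan of the value: at each position with first char 'r' or 'y', check the fragments as prefixes
def pvHasPlaceholder : List Char → Bool
  | [] => false
  | c :: rest =>
      ((c == 'r' || c == 'y') && pvFragmentsB.any (fun f => f.isPrefixOf (c :: rest)))
        || pvHasPlaceholder rest

def contains_placeholders_alt (values : List (String × String)) : List String :=
  (values.filter (fun kv => kv.1 != "_TRIGGER_ID" && pvHasPlaceholder kv.2.toList)).map (·.1)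

-- ===== PRECONDITION & SPEC =====
def Spec_contains_placeholders (values : List (String × String)) (out : List String) : Prop := out = contains_placeholders_alt values
instance (values : List (String × String)) (out : List String) : Decidable (Spec_contains_placeholders values out) := by unfold Spec_contains_placeholders; infer_instance

-- ===== CLAIM (what is proved, stated in full; the proofs are below) =====
def Claim_equal_contains_placeholders : Prop := ∀ (values : List (String × String)), Dom_contains_placeholders values → Spec_contains_placeholders values (contains_placeholders values)

-- ===== LEMMAS AND PROOFS =====

-- every fragment begins with 'r' or 'y', so a fragment-prefix forces the guard character
lemma pvFrag_head (f : List Char) (hf : f ∈ pvFragmentsB) (c : Char) (rest : List Char)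
    (h : f.isPrefixOf (c :: rest) = true) : (c == 'r' || c == 'y') = true := by
  rw [List.isPrefixOf_iff_prefix] at h
  obtain ⟨t, ht⟩ := h
  fin_cases hf <;>
    simp only [show "replace_me".toList = 'r' :: "eplace_me".toList from rfl,
      show "replace-me".toList = 'r' :: "eplace-me".toList from rfl,
      show "replace-with-trigger-id".toList = 'r' :: "eplace-with-trigger-id".toList from rfl,
      show "your-app.run.app".toList = 'y' :: "our-app.run.app".toList from rfl,
      List.cons_append, List.cons.injEq] at ht <;>
    simp [← ht.1]

-- if some fragment is a prefix of some suffix of cs, the scan finds it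
lemma pvHasPlaceholder_of_prefix_drop (cs : List Char) (j : Nat)
    (h : pvFragmentsB.any (fun f => f.isPrefixOf (cs.drop j)) = true) :
    pvHasPlaceholder cs = true := by
  induction cs generalizing j with
  | nil =>
    simp only [List.drop_nil] at h
    simp [pvFragmentsB, List.isPrefixOf] at h
  | cons c rest ih =>
    cases j with
    | zero =>
      simp only [List.drop_zero] at h
      obtain ⟨f, hf, hpre⟩ := List.any_eq_true.mp h
      rw [pvHasPlaceholder, Bool.or_eq_true, Bool.and_eq_true]
      exact Or.inl ⟨pvFrag_head f hf c rest hpre, List.any_eq_true.mpr ⟨f, hf, hpre⟩⟩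
    | succ j' =>
      rw [pvHasPlaceholder]
      simp only [List.drop_succ_cons] at h
      simp [ih j' h]

-- the scan equals the four substring tests of A
lemma pvHasPlaceholder_eq (cs : List Char) :
    pvHasPlaceholder cs = pvFragmentsB.any (fun f => PySem.Chars.isIn f cs) := by
  rcases hb : pvFragmentsB.any (fun f => PySem.Chars.isIn f cs) with _ | _
  · -- no fragment is a substring → the scan never fires
    rw [Bool.eq_false_iff]
    intro habs
    rw [List.any_eq_false] at hb
    induction cs with
    | nil => simp [pvHasPlaceholder] at habs
    | cons c rest ih =>
      rw [pvHasPlaceholder, Bool.or_eq_true, Bool.and_eq_true] at habs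
      rcases habs with ⟨-, hany⟩ | htail
      · obtain ⟨f, hf, hpre⟩ := List.any_eq_true.mp hany
        have hin : PySem.Chars.isIn f (c :: rest) = true :=
          (PySem.Chars.exists_prefix_drop_iff_isIn f (c :: rest)).mp
            ⟨0, by simpa using List.isPrefixOf_iff_prefix.mp hpre⟩
        exact (hb f hf) hin
      · refine ih ?_ htail
        intro f hf
        have h1 := hb f hf
        simp only [Bool.not_eq_true] at h1 ⊢
        rw [PySem.Chars.isIn_eq_false_iff] at h1 ⊢
        exact fun hinf => h1 (List.infix_cons hinf)
  · obtain ⟨f, hf, hin⟩ := List.any_eq_true.mp hb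
    obtain ⟨j, hj⟩ := (PySem.Chars.exists_prefix_drop_iff_isIn f cs).mpr hin
    exact pvHasPlaceholder_of_prefix_drop cs j
      (List.any_eq_true.mpr ⟨f, hf, List.isPrefixOf_iff_prefix.mpr hj⟩)

-- A's loop body, written as the single test B uses
lemma pvStep_eq (bad : List String) (kv : String × String) :
    (if kv.1 == "_TRIGGER_ID" then bad
     else if pvFragmentsA.any (fun f => PySem.Str.isIn f kv.2) then bad ++ [kv.1] else bad) =
    (if (kv.1 != "_TRIGGER_ID" && pvHasPlaceholder kv.2.toList) then bad ++ [kv.1] else bad) := by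
  have hfr : pvFragmentsA.any (fun f => PySem.Str.isIn f kv.2) =
      pvFragmentsB.any (fun f => PySem.Chars.isIn f kv.2.toList) := by
    simp [pvFragmentsA, pvFragmentsB, PySem.Str.isIn_eq]
  by_cases hk : kv.1 = "_TRIGGER_ID"
  · simp [hk]
  · have hbeq : (kv.1 == "_TRIGGER_ID") = false := by simp [hk]
    have hbne : (kv.1 != "_TRIGGER_ID") = true := by simp [bne, hk]
    rw [if_neg (by simp [hbeq]), hfr, ← pvHasPlaceholder_eq, hbne, Bool.true_and]

-- ===== VERDICT (by name: the statement is the Claim_ definition above) =====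
theorem contains_placeholders_spec : Claim_equal_contains_placeholders := by
  intro values _
  unfold Spec_contains_placeholders contains_placeholders contains_placeholders_alt
  rw [show (fun (bad : List String) (kv : String × String) =>
        if kv.1 == "_TRIGGER_ID" then bad
        else if pvFragmentsA.any (fun f => PySem.Str.isIn f kv.2) then bad ++ [kv.1] else bad) =
      (fun bad kv =>
        if (kv.1 != "_TRIGGER_ID" && pvHasPlaceholder kv.2.toList) then bad ++ [kv.1] else bad)
      from funext fun bad => funext fun kv => pvStep_eq bad kv]
  rw [PySem.List.foldl_append_if (fun kv => kv.1 != "_TRIGGER_ID" && pvHasPlaceholder kv.2.toList)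
      (·.1) values []]
  simp
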